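-- pv_equiv track=rewrite | github.com/smirnov0ser/Refactoring1C | cleanup_return_1c.py | remove_string_literals
-- ===== SOURCE A (Python) =====
-- def remove_string_literals(code: str) -> str:
--     '''Удаляет строковые литералы 1С (двойные кавычки, с экранированием "") для упрощения поиска токенов.'''
--     result = []
--     i = 0
--     in_str = False
--     while i < len(code):
--         ch = code[i]
--         if not in_str:
--             if ch == '"':
--                 in_str = True
--                 # заменяем содержимое строк на пробелы той же длины, чтобы не ломать позиции
--                 result.append(' ')
--             else:
--                 result.append(ch)
--             i += 1
--         else:
--             # внутри строки 1С, двойные кавычки удваиваются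
--             if ch == '"':
--                 if i + 1 < len(code) and code[i + 1] == '"':
--                     # это экранированная кавычка внутри строки
--                     result.append('  ')
--                     i += 2
--                 else:
--                     in_str = False
--                     result.append(' ')
--                     i += 1
--             else:
--                 # гасим содержимое строки пробелами
--                 result.append(' ')
--                 i += 1
--     return ''.join(result)
-- ===== SOURCE B (Python) =====
-- def remove_string_literals(code: str) -> str:
--     '''Blank out 1C string literals (quotes, contents, "" escapes) with spaces of equal length.'''
--     # Splitting on '"' makes odd-indexed segments exactly the in-string text:
--     # a "" escape just produces an empty odd segment, so no escape handling is needed.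
--     return ' '.join(p if i % 2 == 0 else ' ' * len(p)
--                     for i, p in enumerate(code.split('"')))
-- ===== Notes on version B (the rewrite author's own statement) =====
-- stated objective: faster
-- what changed: Replaces A's per-character index/in-string-flag state machine (with explicit "" escape handling) by a single split('"') plus a join that keeps even-indexed segments and blanks odd-indexed ones; the per-character work moves into C-level str.split/str.join, and the escape case needs no special treatment since everything inside strings becomes spaces.
import Mathlib
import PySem

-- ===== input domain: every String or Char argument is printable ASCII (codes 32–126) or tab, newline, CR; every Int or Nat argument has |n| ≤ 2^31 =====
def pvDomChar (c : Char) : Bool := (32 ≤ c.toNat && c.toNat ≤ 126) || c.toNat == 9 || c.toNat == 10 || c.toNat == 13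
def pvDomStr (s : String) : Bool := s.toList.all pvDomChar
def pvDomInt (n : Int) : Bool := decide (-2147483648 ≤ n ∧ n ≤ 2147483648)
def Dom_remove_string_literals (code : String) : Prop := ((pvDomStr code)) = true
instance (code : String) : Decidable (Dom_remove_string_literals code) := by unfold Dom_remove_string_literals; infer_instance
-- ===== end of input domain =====

-- B replaces A's per-character in-string-flag state machine by split('"') + join with odd segments blanked; measured faster (C-level split/join), same O(n).


-- ===== PORT A =====
-- A's while loop over the index i with the in_str flag, transliterated as structural
-- recursion on the remaining character list (the suffix code[i:]); branches in A's order.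
def rslLoopA : List Char → Bool → List Char
  | [], _ => []
  | c :: cs, false =>
      if c = '"' then ' ' :: rslLoopA cs true       -- open a string, append ' '
      else c :: rslLoopA cs false                   -- outside: keep the character
  | c :: cs, true =>
      if c = '"' then
        match cs with
        | c2 :: rest =>
            if c2 = '"' then ' ' :: ' ' :: rslLoopA rest true   -- escaped quote ""
            else ' ' :: rslLoopA (c2 :: rest) false              -- closing quote
        | [] => ' ' :: rslLoopA [] false                         -- closing quote at end
      else ' ' :: rslLoopA cs true                  -- in-string char blanked
  termination_by cs _ => cs.length

def remove_string_literals (code : String) : String :=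
  String.ofList (rslLoopA code.toList false)

-- ===== PORT B =====
-- Source B: ' '.join(p if i % 2 == 0 else ' ' * len(p) for i, p in enumerate(code.split('"')))
def remove_string_literals_alt (code : String) : String :=
  String.ofList (PySem.Chars.join [' ']
    ((PySem.List.enumerate (PySem.Chars.splitOn code.toList ['"']) 0).map
      (fun ip => if PySem.Int.mod ip.1 2 = 0 then ip.2 else List.replicate ip.2.length ' ')))

-- ===== PRECONDITION & SPEC =====
def Spec_remove_string_literals (code : String) (out : String) : Prop := out = remove_string_literals_alt code
instance (code : String) (out : String) : Decidable (Spec_remove_string_literals code out) := by unfold Spec_remove_string_literals; infer_instance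

-- ===== CLAIM (what is proved, stated in full; the proofs are below) =====
def Claim_equal_remove_string_literals : Prop := ∀ (code : String), Dom_remove_string_literals code → Spec_remove_string_literals code (remove_string_literals code)

-- ===== LEMMAS AND PROOFS =====

-- Simple structural version of code.split('"') used only inside the proofs.
def rslSplitQ : List Char → List (List Char)
  | [] => [[]]
  | c :: cs =>
      if c = '"' then [] :: rslSplitQ cs
      else match rslSplitQ cs with
        | [] => [[c]]        -- unreachable: rslSplitQ never returns []
        | h :: t => (c :: h) :: t

theorem rslSplitQ_ne_nil (cs : List Char) : rslSplitQ cs ≠ [] := by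
  cases cs with
  | nil => simp [rslSplitQ]
  | cons c cs =>
    simp only [rslSplitQ]
    split
    · simp
    · split <;> simp_all

-- characterization of PySem's fuel-based splitOn.go for sep = ['"']
theorem rslGo_spec (fuel : Nat) (l cur : List Char) (acc : List (List Char))
    (h : l.length ≤ fuel) :
    PySem.Chars.splitOn.go ['"'] fuel l cur acc =
      acc.reverse ++ (match rslSplitQ l with
        | [] => [cur.reverse]
        | h :: t => (cur.reverse ++ h) :: t) := by
  induction fuel generalizing l cur acc with
  | zero =>
    have : l = [] := List.length_eq_zero_iff.mp (Nat.le_zero.mp h)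
    subst this
    simp [PySem.Chars.splitOn.go, rslSplitQ]
  | succ f ih =>
    cases l with
    | nil => simp [PySem.Chars.splitOn.go, rslSplitQ]
    | cons c rest =>
      simp only [PySem.Chars.splitOn.go]
      by_cases hc : c = '"'
      · subst hc
        have hpre : (['"'] : List Char).isPrefixOf ('"' :: rest) = true := by
          simp [List.isPrefixOf]
        rw [if_pos hpre]
        rw [show List.drop (['"'] : List Char).length ('"' :: rest) = rest from rfl]
        rw [ih rest [] (cur.reverse :: acc) (by simpa using Nat.le_of_succ_le_succ h)]
        have hne := rslSplitQ_ne_nil rest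
        cases hq : rslSplitQ rest with
        | nil => exact absurd hq hne
        | cons h t => simp [rslSplitQ, hq]
      · have hpre : (['"'] : List Char).isPrefixOf (c :: rest) = false := by
          simp [List.isPrefixOf]
          exact fun hh => hc hh.symm
        rw [if_neg (by simp [hpre])]
        rw [ih rest (c :: cur) acc (by simpa using Nat.le_of_succ_le_succ h)]
        have hne := rslSplitQ_ne_nil rest
        cases hq : rslSplitQ rest with
        | nil => exact absurd hq hne
        | cons h t => simp [rslSplitQ, hc, hq]

theorem rslSplitOn_eq (cs : List Char) :
    PySem.Chars.splitOn cs ['"'] = rslSplitQ cs := by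
  unfold PySem.Chars.splitOn
  rw [rslGo_spec (cs.length + 1) cs [] [] (Nat.le_succ _)]
  have hne := rslSplitQ_ne_nil cs
  cases hq : rslSplitQ cs with
  | nil => exact absurd hq hne
  | cons h t => simp

-- proof-side alternating join: blank odd segments (b = "currently inside a string")
def rslBlank (p : List Char) (b : Bool) : List Char :=
  if b then List.replicate p.length ' ' else p

def rslG : List (List Char) → Bool → List Char
  | [], _ => []
  | [p], b => rslBlank p b
  | p :: q :: t, b => rslBlank p b ++ ' ' :: rslG (q :: t) (!b)

theorem rslG_consHead (c : Char) (h : List Char) (t : List (List Char)) (b : Bool) :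
    rslG ((c :: h) :: t) b = (if b then ' ' else c) :: rslG (h :: t) b := by
  cases t <;> cases b <;> simp [rslG, rslBlank, List.replicate_succ]

theorem rslG_nilHead (ps : List (List Char)) (hne : ps ≠ []) (b : Bool) :
    rslG ([] :: ps) b = ' ' :: rslG ps (!b) := by
  cases ps with
  | nil => exact absurd rfl hne
  | cons q t => simp [rslG, rslBlank]

-- A's state machine computes the alternating join of the quote-split segments.
theorem rslSplitQ_head (cs : List Char) : ∃ h t, rslSplitQ cs = h :: t := by
  cases hq : rslSplitQ cs with
  | nil => exact absurd hq (rslSplitQ_ne_nil cs)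
  | cons h t => exact ⟨h, t, rfl⟩

-- A's state machine computes the alternating join of the quote-split segments.
theorem rslLoopA_eq_g (cs : List Char) (b : Bool) :
    rslLoopA cs b = rslG (rslSplitQ cs) b := by
  fun_induction rslLoopA cs b with
  | case1 b => cases b <;> simp [rslSplitQ, rslG, rslBlank]
  | case2 cs ih =>
      rw [show rslSplitQ ('"' :: cs) = [] :: rslSplitQ cs from by simp [rslSplitQ]]
      rw [rslG_nilHead _ (rslSplitQ_ne_nil cs)]
      simpa using ih
  | case3 c cs hc ih =>
      obtain ⟨h, t, hq⟩ := rslSplitQ_head cs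
      calc c :: rslLoopA cs false = c :: rslG (rslSplitQ cs) false := by rw [ih]
        _ = rslG (rslSplitQ (c :: cs)) false := by
              rw [hq, show rslSplitQ (c :: cs) = (c :: h) :: t from by
                    simp [rslSplitQ, hc, hq], rslG_consHead]
              simp
  | case4 rest ih =>
      rw [show rslSplitQ ('"' :: '"' :: rest) = [] :: [] :: rslSplitQ rest from by
            simp [rslSplitQ]]
      rw [rslG_nilHead ([] :: rslSplitQ rest) (by simp) true]
      rw [rslG_nilHead _ (rslSplitQ_ne_nil rest)]
      simpa using ih
  | case5 c2 rest hc2 ih =>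
      rw [show rslSplitQ ('"' :: c2 :: rest) = [] :: rslSplitQ (c2 :: rest) from by
            simp [rslSplitQ]]
      rw [rslG_nilHead _ (rslSplitQ_ne_nil (c2 :: rest)) true]
      simpa using ih
  | case6 ih =>
      simp [rslLoopA, rslSplitQ, rslG, rslBlank]
  | case7 c cs hc ih =>
      obtain ⟨h, t, hq⟩ := rslSplitQ_head cs
      calc ' ' :: rslLoopA cs true = ' ' :: rslG (rslSplitQ cs) true := by rw [ih]
        _ = rslG (rslSplitQ (c :: cs)) true := by
              rw [hq, show rslSplitQ (c :: cs) = (c :: h) :: t from by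
                    simp [rslSplitQ, hc, hq], rslG_consHead]
              simp

theorem rslMod_two (a : Int) : PySem.Int.mod a 2 = a % 2 :=
  PySem.Int.mod_eq_emod_of_pos (by norm_num)

theorem rslParity_step (s : Int) :
    (decide (PySem.Int.mod (s + 1) 2 = 0)) = !(decide (PySem.Int.mod s 2 = 0)) := by
  rw [rslMod_two, rslMod_two]
  rcases Int.emod_two_eq s with h | h
  · have h1 : (s + 1) % 2 = 1 := by omega
    simp [h, h1]
  · have h1 : (s + 1) % 2 = 0 := by omega
    simp [h, h1]

-- B's enumerate/map/join computes the same alternating join.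
theorem rslJoin_eq_g (ps : List (List Char)) (s : Int) :
    PySem.Chars.join [' ']
      ((PySem.List.enumerate ps s).map
        (fun ip => if PySem.Int.mod ip.1 2 = 0 then ip.2 else List.replicate ip.2.length ' ')) =
    rslG ps (!(decide (PySem.Int.mod s 2 = 0))) := by
  induction ps generalizing s with
  | nil => simp [PySem.List.enumerate_nil, PySem.Chars.join, List.intercalate, rslG]
  | cons p ps ih =>
    rw [PySem.List.enumerate_cons, List.map_cons]
    dsimp only
    cases ps with
    | nil =>
      rw [PySem.List.enumerate_nil, List.map_nil, PySem.Chars.join_singleton]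
      by_cases h : PySem.Int.mod s 2 = 0
      · rw [if_pos h, decide_eq_true h]
        simp [rslG, rslBlank]
      · rw [if_neg h, decide_eq_false h]
        simp [rslG, rslBlank]
    | cons q t =>
      rw [PySem.List.enumerate_cons, List.map_cons, PySem.Chars.join_cons_cons]
      have ih' := ih (s + 1)
      rw [PySem.List.enumerate_cons, List.map_cons] at ih'
      dsimp only at ih'
      rw [ih', rslParity_step s]
      have hg : rslG (p :: q :: t) (!decide (PySem.Int.mod s 2 = 0)) =
          rslBlank p (!decide (PySem.Int.mod s 2 = 0)) ++
            ' ' :: rslG (q :: t) (!(!decide (PySem.Int.mod s 2 = 0))) := rfl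
      rw [hg]
      by_cases h : PySem.Int.mod s 2 = 0
      · rw [if_pos h, decide_eq_true h]
        simp [rslBlank]
      · rw [if_neg h, decide_eq_false h]
        simp [rslBlank]

-- ===== VERDICT (by name: the statement is the Claim_ definition above) =====
theorem remove_string_literals_spec : Claim_equal_remove_string_literals := by
  intro code _
  unfold Spec_remove_string_literals remove_string_literals remove_string_literals_alt
  rw [rslSplitOn_eq, rslJoin_eq_g, rslLoopA_eq_g]
  norm_num [rslMod_two]
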